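-- pv_equiv track=rewrite | github.com/tye2002/school-practices | 2019-2020/Discrete Structures/Lab/Lab1/Lab1.py | sumN
-- ===== SOURCE A (Python) =====
-- def sumN(n):
--     sumN = 0
--     if n>0:
--         for i in range (0,n+1):
--             sumN += i
--     else:
--         for i in range (n,0):
--             sumN += i
--     return sumN
-- ===== SOURCE B (Python) =====
-- def sumN(n):
--     # closed-form arithmetic series: sum 0..n for n>0, sum n..-1 for n<=0
--     if n > 0:
--         return n * (n + 1) // 2
--     return (n - n * n) // 2
-- ===== Notes on version B (the rewrite author's own statement) =====
-- stated objective: faster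
-- what changed: Replaces the O(n) summation loop with the closed-form Gauss arithmetic-series formula in each branch.
import Mathlib
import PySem

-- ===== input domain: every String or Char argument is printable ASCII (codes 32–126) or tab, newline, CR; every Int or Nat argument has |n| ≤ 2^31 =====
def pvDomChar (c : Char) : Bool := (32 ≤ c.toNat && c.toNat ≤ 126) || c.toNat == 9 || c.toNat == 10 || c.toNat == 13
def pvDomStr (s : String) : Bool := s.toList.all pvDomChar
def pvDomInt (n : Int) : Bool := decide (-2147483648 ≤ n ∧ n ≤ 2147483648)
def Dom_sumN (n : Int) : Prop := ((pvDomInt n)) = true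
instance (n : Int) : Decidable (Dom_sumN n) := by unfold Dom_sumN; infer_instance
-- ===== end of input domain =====

-- B replaces A's O(n) summation loop with the closed-form arithmetic-series formula (faster, asymptotic).

-- ===== PORT A =====
def sumN (n : Int) : Int :=
  if n > 0 then
    (PySem.List.pyRange 0 (n + 1) 1).foldl (fun s i => s + i) 0
  else
    (PySem.List.pyRange n 0 1).foldl (fun s i => s + i) 0

-- ===== PORT B =====
def sumN_alt (n : Int) : Int :=
  if n > 0 then PySem.Int.floordiv (n * (n + 1)) 2
  else PySem.Int.floordiv (n - n * n) 2

-- ===== PRECONDITION & SPEC =====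
def Spec_sumN (n : Int) (out : Int) : Prop := out = sumN_alt n
instance (n : Int) (out : Int) : Decidable (Spec_sumN n out) := by unfold Spec_sumN; infer_instance

-- ===== CLAIM (what is proved, stated in full; the proofs are below) =====
def Claim_equal_sumN : Prop := ∀ (n : Int), Dom_sumN n → Spec_sumN n (sumN n)

-- ===== LEMMAS AND PROOFS =====

-- twice the running sum of a+0, a+1, …, a+(m-1) starting from s
theorem pv_foldl_range_sum (m : Nat) (a s : Int) :
    2 * (List.foldl (fun s i => s + i) s (List.map (fun k : Nat => a + (k : Int)) (List.range m)))
      = 2 * s + m * (2 * a + m - 1) := by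
  induction m generalizing s with
  | zero => simp
  | succ m ih =>
    rw [List.range_succ, List.map_append, List.foldl_append]
    simp only [List.map_cons, List.map_nil, List.foldl_cons, List.foldl_nil]
    have h := ih s
    push_cast at h ⊢
    nlinarith [h]

-- ===== VERDICT (by name: the statement is the Claim_ definition above) =====
theorem sumN_spec : Claim_equal_sumN := by
  intro n _
  unfold Spec_sumN sumN sumN_alt
  by_cases hn : n > 0
  · simp only [hn, if_pos]
    rw [PySem.List.pyRange_one]
    have h := pv_foldl_range_sum (n + 1 - 0).toNat 0 0
    have hm : ((n + 1 - 0).toNat : Int) = n + 1 := by omega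
    rw [hm] at h
    have h2 : n * (n + 1) = 2 * List.foldl (fun s i => s + i) 0 (List.map (fun k : Nat => (0:Int) + (k : Int)) (List.range (n + 1 - 0).toNat)) := by rw [h]; ring
    rw [eq_comm, PySem.Int.floordiv_eq_iff_of_pos (by omega), h2]
    constructor <;> linarith
  · simp only [hn, if_false]
    rw [PySem.List.pyRange_one]
    have h := pv_foldl_range_sum (0 - n).toNat n 0
    have hm : (((0 : Int) - n).toNat : Int) = -n := by omega
    rw [hm] at h
    have h2 : n - n * n = 2 * List.foldl (fun s i => s + i) 0 (List.map (fun k : Nat => n + (k : Int)) (List.range (0 - n).toNat)) := by rw [h]; ring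
    rw [eq_comm, PySem.Int.floordiv_eq_iff_of_pos (by omega), h2]
    constructor <;> linarith
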